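-- pv_equiv track=rewrite | github.com/rodgui/office2md | office2md/converters/docx_converter.py | _cleanup_markdown
-- ===== SOURCE A (Python) =====
-- def _cleanup_markdown(markdown: str) -> str:
--     """Final cleanup pass on markdown."""
--     lines = markdown.split('\n')
--     cleaned = []
--
--     for line in lines:
--         if line.strip() == "":
--             if not cleaned or cleaned[-1].strip() != "":
--                 cleaned.append("")
--         else:
--             cleaned.append(line)
--
--     while cleaned and cleaned[0] == "":
--         cleaned.pop(0)
--     while cleaned and cleaned[-1] == "":
--         cleaned.pop()
--
--     return "\n".join(cleaned)
-- ===== SOURCE B (Python) =====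
-- def _cleanup_markdown(markdown: str) -> str:
--     """Final cleanup pass on markdown: group consecutive non-blank lines into
--     paragraphs, then join the paragraphs with blank separators."""
--     paragraphs = []
--     current = []
--     for line in markdown.split('\n'):
--         if line.strip():
--             current.append(line)
--         elif current:
--             paragraphs.append(current)
--             current = []
--     if current:
--         paragraphs.append(current)
--     return "\n\n".join("\n".join(p) for p in paragraphs)
-- ===== Notes on version B (the rewrite author's own statement) =====
-- stated objective: simpler
-- what changed: Instead of a stateful scan that checks the last appended element to collapse blank runs and then two edge-trimming pop loops, B groups consecutive non-blank lines into paragraphs in one pass and joins the paragraphs with a double newline separator, so collapsing and edge-trimming fall out of the join.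
import Mathlib
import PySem

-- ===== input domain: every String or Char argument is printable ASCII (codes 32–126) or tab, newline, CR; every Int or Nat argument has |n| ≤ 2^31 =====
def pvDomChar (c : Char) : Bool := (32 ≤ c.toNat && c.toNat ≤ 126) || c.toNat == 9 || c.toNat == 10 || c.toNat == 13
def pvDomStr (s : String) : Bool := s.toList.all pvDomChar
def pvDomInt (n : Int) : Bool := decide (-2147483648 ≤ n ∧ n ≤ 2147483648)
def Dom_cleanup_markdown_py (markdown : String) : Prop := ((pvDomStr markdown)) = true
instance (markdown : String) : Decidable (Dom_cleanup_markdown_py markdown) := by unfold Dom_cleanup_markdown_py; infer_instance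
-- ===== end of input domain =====

-- B groups consecutive non-blank lines into paragraphs and joins them with blank separators
-- (objective: simpler — no stateful last-element check and no edge-trimming loops). Same return value as A on every input.

-- ===== PORT A =====
-- while cleaned and cleaned[0] == "": cleaned.pop(0)
def pvPopLeadingEmpty : List (List Char) → List (List Char)
  | [] => []
  | x :: xs => if x == [] then pvPopLeadingEmpty xs else x :: xs

-- the body of A's for-loop
def pvStepA (cleaned : List (List Char)) (line : List Char) : List (List Char) :=
  if PySem.Chars.strip line == [] then
    -- if not cleaned or cleaned[-1].strip() != "": cleaned.append("")
    if cleaned.isEmpty || !(PySem.Chars.strip ((cleaned.getLast?).getD []) == []) then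
      cleaned ++ [[]]
    else cleaned
  else cleaned ++ [line]

def cleanup_markdown_py (markdown : String) : String :=
  let lines := PySem.Chars.splitOn markdown.toList ['\n']
  let cleaned := lines.foldl pvStepA []
  let cleaned := pvPopLeadingEmpty cleaned
  -- while cleaned and cleaned[-1] == "": cleaned.pop()  — the same pop loop, run on the reversed list
  let cleaned := (pvPopLeadingEmpty cleaned.reverse).reverse
  String.ofList (PySem.Chars.join ['\n'] cleaned)

-- ===== PORT B =====
-- the body of B's for-loop, on the state (paragraphs, current)
def pvStepB (st : List (List (List Char)) × List (List Char)) (line : List Char) :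
    List (List (List Char)) × List (List Char) :=
  if !(PySem.Chars.strip line == []) then (st.1, st.2 ++ [line])
  else if !st.2.isEmpty then (st.1 ++ [st.2], [])
  else st

def cleanup_markdown_py_alt (markdown : String) : String :=
  let st := (PySem.Chars.splitOn markdown.toList ['\n']).foldl pvStepB ([], [])
  let paragraphs := if !st.2.isEmpty then st.1 ++ [st.2] else st.1
  String.ofList (PySem.Chars.join ['\n', '\n'] (paragraphs.map (fun p => PySem.Chars.join ['\n'] p)))

-- ===== PRECONDITION & SPEC =====
def Spec_cleanup_markdown_py (markdown : String) (out : String) : Prop := out = cleanup_markdown_py_alt markdown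
instance (markdown : String) (out : String) : Decidable (Spec_cleanup_markdown_py markdown out) := by unfold Spec_cleanup_markdown_py; infer_instance

-- ===== CLAIM (what is proved, stated in full; the proofs are below) =====
def Claim_equal_cleanup_markdown_py : Prop := ∀ (markdown : String), Dom_cleanup_markdown_py markdown → Spec_cleanup_markdown_py markdown (cleanup_markdown_py markdown)

-- ===== LEMMAS AND PROOFS =====

-- a line is non-blank iff its strip is non-empty
def pvNB (l : List Char) : Bool := !(PySem.Chars.strip l == [])

-- the paragraphs: maximal runs of consecutive non-blank lines
def pvParas : List (List Char) → List (List (List Char))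
  | [] => []
  | l :: ls =>
    if pvNB l then (l :: ls.takeWhile pvNB) :: pvParas (ls.dropWhile pvNB)
    else pvParas ls
termination_by ls => ls.length
decreasing_by
  · simpa using Nat.lt_succ_of_le (List.length_dropWhile_le _ _)
  · simp

-- paragraphs joined by a single blank line
def pvJoinGroups : List (List (List Char)) → List (List Char)
  | [] => []
  | [p] => p
  | p :: q :: ps => p ++ [] :: pvJoinGroups (q :: ps)

-- what A's fold appends after `cleaned`, given whether cleaned ends in a blank marker
def pvTail : Bool → List (List Char) → List (List Char)
  | _, [] => []
  | pb, l :: ls =>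
    if PySem.Chars.strip l == [] then
      if pb then pvTail true ls else [] :: pvTail true ls
    else l :: pvTail false ls

-- does `cleaned` end in a blank entry?
def pvPB (cleaned : List (List Char)) : Bool :=
  match cleaned.getLast? with
  | none => false
  | some x => PySem.Chars.strip x == []

-- B's accumulator fold, as a structural recursion
def pvAcc : List (List Char) → List (List Char) → List (List (List Char))
  | cur, [] => if cur.isEmpty then [] else [cur]
  | cur, l :: ls =>
    if pvNB l then pvAcc (cur ++ [l]) ls
    else if cur.isEmpty then pvAcc [] ls
    else cur :: pvAcc [] ls

theorem pvCond_eq (cleaned : List (List Char)) :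
    (cleaned.isEmpty || !(PySem.Chars.strip ((cleaned.getLast?).getD []) == [])) = !(pvPB cleaned) := by
  cases h : cleaned.getLast? with
  | none =>
    have : cleaned = [] := List.getLast?_eq_none_iff.mp h
    subst this; simp [pvPB]
  | some x =>
    have hne : cleaned ≠ [] := by intro e; subst e; simp at h
    simp [pvPB, h, List.isEmpty_eq_false_iff.mpr hne]

theorem pvFoldA_eq (ls : List (List Char)) (cleaned : List (List Char)) :
    ls.foldl pvStepA cleaned = cleaned ++ pvTail (pvPB cleaned) ls := by
  induction ls generalizing cleaned with
  | nil => simp [pvTail]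
  | cons l ls ih =>
    rw [List.foldl_cons]
    have hc := pvCond_eq cleaned
    by_cases hb : (PySem.Chars.strip l == []) = true
    · cases hp : pvPB cleaned with
      | true =>
        have hc' : (cleaned.isEmpty || !(PySem.Chars.strip ((cleaned.getLast?).getD []) == [])) = false := by
          rw [hc, hp]; rfl
        have hstep : pvStepA cleaned l = cleaned := by
          unfold pvStepA; rw [hc']; simp [hb]
        rw [hstep, ih]
        simp [pvTail, hb, hp]
      | false =>
        have hc' : (cleaned.isEmpty || !(PySem.Chars.strip ((cleaned.getLast?).getD []) == [])) = true := by
          rw [hc, hp]; rfl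
        have hstep : pvStepA cleaned l = cleaned ++ [[]] := by
          unfold pvStepA; rw [hc']; simp [hb]
        have h2 : pvPB (cleaned ++ [([] : List Char)]) = true := by
          simp [pvPB]
          decide
        rw [hstep, ih, h2]
        simp [pvTail, hb]
    · have hstep : pvStepA cleaned l = cleaned ++ [l] := by
        unfold pvStepA; simp [hb]
      have h2 : pvPB (cleaned ++ [l]) = false := by
        simp only [pvPB, List.getLast?_concat]
        simpa using hb
      rw [hstep, ih, h2]
      simp [pvTail, hb]

theorem pvPop_tail_true (ls : List (List Char)) :
    pvPopLeadingEmpty (pvTail true ls) = pvTail true ls := by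
  induction ls with
  | nil => rfl
  | cons l ls ih =>
    by_cases hb : (PySem.Chars.strip l == []) = true
    · simp [pvTail, hb, ih]
    · have hl : (l == ([] : List Char)) = false := by
        cases l with
        | nil => exact absurd (by decide) hb
        | cons a as => rfl
      simp [pvTail, hb, pvPopLeadingEmpty, hl]

theorem pvPop_tail_false (ls : List (List Char)) :
    pvPopLeadingEmpty (pvTail false ls) = pvTail true ls := by
  cases ls with
  | nil => rfl
  | cons l ls =>
    by_cases hb : (PySem.Chars.strip l == []) = true
    · simp [pvTail, hb, pvPopLeadingEmpty, pvPop_tail_true]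
    · have hl : (l == ([] : List Char)) = false := by
        cases l with
        | nil => exact absurd (by decide) hb
        | cons a as => rfl
      simp [pvTail, hb, pvPopLeadingEmpty, hl]

theorem pvTail_false_split (ls : List (List Char)) :
    pvTail false ls = ls.takeWhile pvNB ++ pvTail false (ls.dropWhile pvNB) := by
  induction ls with
  | nil => rfl
  | cons l ls ih =>
    by_cases hnb : pvNB l = true
    · have hb : (PySem.Chars.strip l == []) = false := by simpa [pvNB] using hnb
      simp [pvTail, hb, List.takeWhile_cons, List.dropWhile_cons, hnb, ih]
    · have hb : (PySem.Chars.strip l == []) = true := by simpa [pvNB] using hnb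
      simp [List.takeWhile_cons, List.dropWhile_cons, hnb]

-- every paragraph ends in a non-blank line (in particular is nonempty)
theorem pvParas_getLast (ls : List (List Char)) :
    ∀ p ∈ pvParas ls, ∃ y, p.getLast? = some y ∧ pvNB y = true := by
  induction ls using pvParas.induct with
  | case1 => intro p hp; simp [pvParas] at hp
  | case2 l ls hnb ih =>
    intro p hp
    rw [pvParas, if_pos hnb] at hp
    rcases List.mem_cons.mp hp with rfl | hp
    · rcases htk : (ls.takeWhile pvNB).getLast? with _ | z
      · have : ls.takeWhile pvNB = [] := List.getLast?_eq_none_iff.mp htk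
        exact ⟨l, by simp [this], hnb⟩
      · exact ⟨z, by simp [List.getLast?_cons, htk],
          List.mem_takeWhile_imp (List.mem_of_getLast? htk)⟩
    · exact ih p hp
  | case3 l ls hnb ih =>
    intro p hp
    rw [pvParas, if_neg hnb] at hp
    exact ih p hp

theorem pvJoinGroups_ne_nil (ps : List (List (List Char))) (h : ∀ p ∈ ps, p ≠ []) (hne : ps ≠ []) :
    pvJoinGroups ps ≠ [] := by
  match ps with
  | [] => exact absurd rfl hne
  | [p] => simpa [pvJoinGroups] using h p (by simp)
  | p :: q :: ps =>
    have hp : p ≠ [] := h p (by simp)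
    simp [pvJoinGroups, hp]

theorem pvJoinGroups_getLast (ps : List (List (List Char)))
    (h : ∀ p ∈ ps, ∃ y, p.getLast? = some y ∧ pvNB y = true) (hne : ps ≠ []) :
    ∃ y, (pvJoinGroups ps).getLast? = some y ∧ pvNB y = true := by
  induction ps with
  | nil => exact absurd rfl hne
  | cons p ps ih =>
    cases ps with
    | nil => simpa [pvJoinGroups] using h p (by simp)
    | cons q ps' =>
      obtain ⟨y, hy, hnb⟩ := ih (fun r hr => h r (by simp [hr])) (by simp)
      refine ⟨y, ?_, hnb⟩
      show (p ++ [] :: pvJoinGroups (q :: ps')).getLast? = some y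
      rw [List.getLast?_append, List.getLast?_cons, hy]
      rfl

-- the structure of A's collapsed list: the joined paragraphs, possibly with one trailing blank
theorem pvTail_structure (ls : List (List Char)) :
    pvTail true ls = pvJoinGroups (pvParas ls) ∨
      (pvParas ls ≠ [] ∧ pvTail true ls = pvJoinGroups (pvParas ls) ++ [[]]) := by
  induction ls using pvParas.induct with
  | case1 =>
    left
    rw [show pvParas ([] : List (List Char)) = [] from by rw [pvParas]]
    rfl
  | case2 l ls hnb ih =>
    have hb : (PySem.Chars.strip l == []) = false := by simpa [pvNB] using hnb
    have hstep : pvTail true (l :: ls) = l :: (ls.takeWhile pvNB ++ pvTail false (ls.dropWhile pvNB)) := by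
      rw [pvTail, if_neg (by simp [hb]), pvTail_false_split ls]
    rw [pvParas, if_pos hnb]
    cases hd : ls.dropWhile pvNB with
    | nil =>
      left
      rw [hstep, hd]
      rw [show pvParas ([] : List (List Char)) = [] from by rw [pvParas]]
      simp [pvTail, pvJoinGroups]
    | cons b r =>
      have hbb : pvNB b = false := by
        have h0 := List.head?_dropWhile_not pvNB ls
        rw [hd] at h0
        simpa using h0
      have hbb' : (PySem.Chars.strip b == []) = true := by simpa [pvNB] using hbb
      have hfd : pvTail false (b :: r) = [] :: pvTail true (b :: r) := by
        simp [pvTail, hbb']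
      rw [hd] at ih
      rw [hstep, hd, hfd]
      cases hpd : pvParas (b :: r) with
      | nil =>
        right
        rcases ih with ihl | ⟨ihn, _⟩
        · rw [hpd] at ihl
          simp only [pvJoinGroups] at ihl
          rw [ihl]
          exact ⟨by simp, by simp [pvJoinGroups]⟩
        · exact absurd hpd ihn
      | cons g gs =>
        have hJ : pvJoinGroups ((l :: ls.takeWhile pvNB) :: g :: gs)
            = (l :: ls.takeWhile pvNB) ++ [] :: pvJoinGroups (g :: gs) := rfl
        rw [hpd] at ih
        rcases ih with ihl | ⟨_, ihr⟩
        · left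
          rw [ihl, hJ]
          simp
        · right
          rw [ihr, hJ]
          exact ⟨by simp, by simp⟩
  | case3 l ls hnb ih =>
    rw [pvParas, if_neg hnb]
    have hb : (PySem.Chars.strip l == []) = true := by simpa [pvNB] using hnb
    rw [pvTail, if_pos hb, if_pos rfl]
    exact ih

theorem pvPopT_append_blank (xs : List (List Char)) :
    (pvPopLeadingEmpty (xs ++ [([] : List Char)]).reverse).reverse = (pvPopLeadingEmpty xs.reverse).reverse := by
  have : ((xs ++ [([] : List Char)]).reverse) = [] :: xs.reverse := by simp
  rw [this, pvPopLeadingEmpty]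
  simp

theorem pvPopT_of_getLast (xs : List (List Char)) (y : List Char)
    (hy : xs.getLast? = some y) (hne : (y == []) = false) :
    (pvPopLeadingEmpty xs.reverse).reverse = xs := by
  cases hx : xs.reverse with
  | nil =>
    have hxs : xs = [] := by simpa using congrArg List.reverse hx
    subst hxs
    simp at hy
  | cons z t =>
    have hz : z = y := by
      have h1 : xs.reverse.head? = xs.getLast? := List.head?_reverse
      rw [hx, hy] at h1
      simpa using h1
    subst hz
    rw [pvPopLeadingEmpty, if_neg (by simp_all)]
    have : xs = (z :: t).reverse := by
      rw [← hx, List.reverse_reverse]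
    rw [← this]

theorem pvPopT_joinGroups (ls : List (List Char)) :
    (pvPopLeadingEmpty (pvJoinGroups (pvParas ls)).reverse).reverse = pvJoinGroups (pvParas ls) := by
  cases hp : pvParas ls with
  | nil => simp [pvJoinGroups, pvPopLeadingEmpty]
  | cons g gs =>
    have hgl := pvParas_getLast ls
    rw [hp] at hgl
    obtain ⟨y, hy, hnb⟩ := pvJoinGroups_getLast (g :: gs) hgl (by simp)
    have hyn : (y == ([] : List Char)) = false := by
      cases y with
      | nil => exact absurd hnb (by decide)
      | cons a as => rfl
    exact pvPopT_of_getLast _ y hy hyn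

theorem pvFoldB_eq (ls : List (List Char)) (ps : List (List (List Char))) (cur : List (List Char)) :
    (let st := ls.foldl pvStepB (ps, cur)
     if !st.2.isEmpty then st.1 ++ [st.2] else st.1) = ps ++ pvAcc cur ls := by
  induction ls generalizing ps cur with
  | nil =>
    cases hc : cur.isEmpty
    · simp [pvAcc, hc]
    · simp [pvAcc, hc]
  | cons l ls ih =>
    rw [List.foldl_cons]
    by_cases hb : (PySem.Chars.strip l == []) = true
    · have hnb : pvNB l = false := by simp [pvNB, hb]
      cases hc : cur.isEmpty
      · have hstep : pvStepB (ps, cur) l = (ps ++ [cur], []) := by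
          simp [pvStepB, hb, hc]
        rw [hstep, ih]
        simp [pvAcc, hnb, hc]
      · have hcur : cur = [] := List.isEmpty_iff.mp hc
        have hstep : pvStepB (ps, cur) l = (ps, cur) := by
          simp [pvStepB, hb, hc]
        rw [hstep, ih]
        simp [pvAcc, hnb, hcur]
    · have hnb : pvNB l = true := by simp [pvNB, hb]
      have hstep : pvStepB (ps, cur) l = (ps, cur ++ [l]) := by
        simp [pvStepB, hb]
      rw [hstep, ih]
      simp [pvAcc, hnb]

theorem pvAcc_eq (ls : List (List Char)) (cur : List (List Char)) :
    pvAcc cur ls = if cur.isEmpty then pvParas ls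
      else (cur ++ ls.takeWhile pvNB) :: pvParas (ls.dropWhile pvNB) := by
  induction ls generalizing cur with
  | nil => simp [pvAcc, pvParas]
  | cons l ls ih =>
    by_cases hnb : pvNB l = true
    · rw [pvAcc, if_pos hnb, ih]
      have hne : ((cur ++ [l]).isEmpty) = false := by simp
      rw [hne]
      cases hc : cur.isEmpty
      · have : cur ≠ [] := by simpa using hc
        simp [List.takeWhile_cons, List.dropWhile_cons, hnb, hc]
      · have hcur : cur = [] := List.isEmpty_iff.mp hc
        subst hcur
        rw [pvParas, if_pos hnb]
        simp [List.takeWhile_cons, List.dropWhile_cons, hnb, hc]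
    · have hnb' : pvNB l = false := by simpa using hnb
      rw [pvAcc, if_neg hnb]
      have hps : pvParas (l :: ls) = pvParas ls := by rw [pvParas, if_neg hnb]
      cases hc : cur.isEmpty
      · simp [ih, List.takeWhile_cons, List.dropWhile_cons, hnb', hc, hps]
      · simp [ih, hc, hps]

theorem pvJoin_append (sep : List Char) (p : List (List Char)) (y : List Char) (ys : List (List Char)) :
    p ≠ [] → PySem.Chars.join sep (p ++ y :: ys) = PySem.Chars.join sep p ++ sep ++ PySem.Chars.join sep (y :: ys) := by
  intro hp
  induction p with
  | nil => exact absurd rfl hp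
  | cons a p' ih =>
    cases p' with
    | nil => simp [PySem.Chars.join_cons_cons, PySem.Chars.join_singleton]
    | cons b p'' =>
      rw [show (a :: b :: p'') ++ y :: ys = a :: b :: (p'' ++ y :: ys) from by simp]
      rw [PySem.Chars.join_cons_cons]
      have h2 := ih (by simp)
      rw [show (b :: p'') ++ y :: ys = b :: (p'' ++ y :: ys) from by simp] at h2
      rw [h2, PySem.Chars.join_cons_cons]
      simp [List.append_assoc]

theorem pvJoin_groups (ps : List (List (List Char))) (h : ∀ p ∈ ps, p ≠ []) :
    PySem.Chars.join ['\n'] (pvJoinGroups ps)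
      = PySem.Chars.join ['\n', '\n'] (ps.map (fun p => PySem.Chars.join ['\n'] p)) := by
  induction ps with
  | nil => simp [pvJoinGroups, PySem.Chars.join_nil]
  | cons p ps ih =>
    cases ps with
    | nil => simp [pvJoinGroups, PySem.Chars.join_singleton]
    | cons q ps' =>
      have hp : p ≠ [] := h p (by simp)
      have hR : pvJoinGroups (q :: ps') ≠ [] :=
        pvJoinGroups_ne_nil (q :: ps') (fun r hr => h r (by simp [hr])) (by simp)
      show PySem.Chars.join ['\n'] (p ++ [] :: pvJoinGroups (q :: ps')) = _
      rw [pvJoin_append ['\n'] p [] (pvJoinGroups (q :: ps')) hp]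
      cases hRc : pvJoinGroups (q :: ps') with
      | nil => exact absurd hRc hR
      | cons y R' =>
        have h2 : ([] : List Char) :: y :: R' = [] :: y :: R' := rfl
        rw [PySem.Chars.join_cons_cons]
        rw [show (List.map (fun p => PySem.Chars.join ['\n'] p) (p :: q :: ps'))
            = PySem.Chars.join ['\n'] p :: PySem.Chars.join ['\n'] q
              :: List.map (fun p => PySem.Chars.join ['\n'] p) ps' from rfl]
        rw [PySem.Chars.join_cons_cons]
        rw [show PySem.Chars.join ['\n'] q :: List.map (fun p => PySem.Chars.join ['\n'] p) ps'
            = List.map (fun p => PySem.Chars.join ['\n'] p) (q :: ps') from rfl]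
        rw [← ih (fun r hr => h r (by simp [hr]))]
        rw [hRc]
        simp [List.append_assoc]

-- ===== VERDICT (by name: the statement is the Claim_ definition above) =====
theorem cleanup_markdown_py_spec : Claim_equal_cleanup_markdown_py := by
  unfold Claim_equal_cleanup_markdown_py
  intro md _
  unfold Spec_cleanup_markdown_py cleanup_markdown_py cleanup_markdown_py_alt
  have hA := pvFoldA_eq (PySem.Chars.splitOn md.toList ['\n']) []
  have hPB : pvPB [] = false := rfl
  rw [hPB] at hA
  simp only [List.nil_append] at hA
  have hB := pvFoldB_eq (PySem.Chars.splitOn md.toList ['\n']) [] []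
  rw [pvAcc_eq] at hB
  simp only [List.isEmpty_nil, if_pos rfl, List.nil_append] at hB
  simp only [hA, hB, pvPop_tail_false]
  have hnn : ∀ p ∈ pvParas (PySem.Chars.splitOn md.toList ['\n']), p ≠ [] := by
    intro p hp
    obtain ⟨y, hy, _⟩ := pvParas_getLast _ p hp
    intro e; subst e; simp at hy
  rcases pvTail_structure (PySem.Chars.splitOn md.toList ['\n']) with h | ⟨_, h⟩
  · rw [h, pvPopT_joinGroups]
    exact congrArg String.ofList (pvJoin_groups _ hnn)
  · rw [h, pvPopT_append_blank, pvPopT_joinGroups]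
    exact congrArg String.ofList (pvJoin_groups _ hnn)
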